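-- pv_equiv track=rewrite | github.com/pypi-data/pypi-mirror-124 | packages/sv-seg/sv_seg-1.1.tar.gz/sv_seg-1.1/sv/libs/core/trainer.py | _find_best_value_index
-- ===== SOURCE A (Python) =====
-- def _find_best_value_index(value_list: list, higher_better=True):
--     def _sub_func(value: list):
--         temp_list = []
--         for i, v in enumerate(value_list):
--             if v == value:
--                 temp_list.append(i)
--         return temp_list[-1]
--
--     if higher_better:
--         max_val = max(value_list)
--         return _sub_func(value=max_val)
--     else:
--         min_val = min(value_list)
--         return _sub_func(value=min_val)
-- ===== SOURCE B (Python) =====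
-- def _find_best_value_index(value_list: list, higher_better=True):
--     if higher_better:
--         return max(range(len(value_list)), key=lambda i: (value_list[i], i))
--     return min(range(len(value_list)), key=lambda i: (value_list[i], -i))
-- ===== Notes on version B (the rewrite author's own statement) =====
-- stated objective: idiomatic
-- what changed: Replaces the compute-extremum-then-rescan-and-collect-indices pair with a single keyed selection over the index range whose tuple key breaks ties toward the largest index.
-- outside the precondition, e.g. on _find_best_value_index([], True): A raises ValueError, B raises ValueError
import Mathlib
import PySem

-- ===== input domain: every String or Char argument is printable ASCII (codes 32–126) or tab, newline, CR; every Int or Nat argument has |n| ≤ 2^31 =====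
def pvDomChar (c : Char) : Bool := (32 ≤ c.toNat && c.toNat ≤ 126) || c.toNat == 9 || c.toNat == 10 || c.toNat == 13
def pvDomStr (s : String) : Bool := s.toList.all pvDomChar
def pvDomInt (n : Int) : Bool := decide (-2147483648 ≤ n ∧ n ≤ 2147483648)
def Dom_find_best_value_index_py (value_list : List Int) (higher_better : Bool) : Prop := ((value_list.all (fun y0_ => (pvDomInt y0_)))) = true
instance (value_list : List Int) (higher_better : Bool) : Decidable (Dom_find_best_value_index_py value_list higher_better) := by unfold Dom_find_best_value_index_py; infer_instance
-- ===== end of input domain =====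

-- B replaces A's extremum-then-rescan pair with one keyed selection over indices (idiomatic, same cost).

-- ===== PORT A =====
-- inner helper _sub_func: collect the indices whose value equals `value`, return the last one
def pvSubFunc (value_list : List Int) (value : Int) : Int :=
  let temp_list := (PySem.List.enumerate value_list).foldl
    (fun acc iv => if iv.2 == value then acc ++ [iv.1] else acc) []
  PySem.List.pyGetD temp_list (-1) 0  -- temp_list[-1]; temp_list is nonempty whenever value ∈ value_list

def find_best_value_index_py (value_list : List Int) (higher_better : Bool) : Int :=
  if higher_better then
    match PySem.List.max? value_list (fun y => y) with
    | some max_val => pvSubFunc value_list max_val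
    | none => 0  -- max([]) raises ValueError; excluded by Pre_
  else
    match PySem.List.min? value_list (fun y => y) with
    | some min_val => pvSubFunc value_list min_val
    | none => 0  -- min([]) raises ValueError; excluded by Pre_

-- ===== PORT B =====
-- lexicographic comparisons on the (value, tiebreak) tuple keys (Python's tuple > / <)
def pvLexGt (a b : Int × Int) : Bool := a.1 > b.1 || (a.1 == b.1 && a.2 > b.2)
def pvLexLt (a b : Int × Int) : Bool := a.1 < b.1 || (a.1 == b.1 && a.2 < b.2)

def find_best_value_index_py_alt (value_list : List Int) (higher_better : Bool) : Int :=
  let idxs := PySem.List.pyRange 0 value_list.length 1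
  if higher_better then
    -- max(range(n), key=lambda i: (value_list[i], i)) : first key-maximum, strict-> replacement
    (idxs.foldl (fun best i =>
      match best with
      | none => some i
      | some b =>
          if pvLexGt (PySem.List.pyGetD value_list i 0, i) (PySem.List.pyGetD value_list b 0, b)
          then some i else some b) none).getD 0   -- getD never used: range nonempty under Pre_
  else
    -- min(range(n), key=lambda i: (value_list[i], -i))
    (idxs.foldl (fun best i =>
      match best with
      | none => some i
      | some b =>
          if pvLexLt (PySem.List.pyGetD value_list i 0, -i) (PySem.List.pyGetD value_list b 0, -b)
          then some i else some b) none).getD 0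

-- ===== PRECONDITION & SPEC =====
-- Pre_ excludes only the empty list, on which A (and B) raise ValueError via max([])/min([]).
def Pre_find_best_value_index_py (value_list : List Int) (higher_better : Bool) : Prop := value_list ≠ []
instance (value_list : List Int) (higher_better : Bool) : Decidable (Pre_find_best_value_index_py value_list higher_better) := by unfold Pre_find_best_value_index_py; infer_instance
def pvWitness_find_best_value_index_py : List Int × Bool := ([3, 1, 3], true)

def Spec_find_best_value_index_py (value_list : List Int) (higher_better : Bool) (out : Int) : Prop := out = find_best_value_index_py_alt value_list higher_better
instance (value_list : List Int) (higher_better : Bool) (out : Int) : Decidable (Spec_find_best_value_index_py value_list higher_better out) := by unfold Spec_find_best_value_index_py; infer_instance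

-- ===== CLAIM (what is proved, stated in full; the proofs are below) =====
def Claim_equal_find_best_value_index_py : Prop := ∀ (value_list : List Int) (higher_better : Bool), Dom_find_best_value_index_py value_list higher_better → Pre_find_best_value_index_py value_list higher_better → Spec_find_best_value_index_py value_list higher_better (find_best_value_index_py value_list higher_better)

-- ===== LEMMAS AND PROOFS =====

-- lexicographic ≤ on Int × Int, as a Prop
def pvKeyLe (a b : Int × Int) : Prop := a.1 < b.1 ∨ (a.1 = b.1 ∧ a.2 ≤ b.2)

theorem pvLexGt_false_iff (a b : Int × Int) : pvLexGt a b = false ↔ pvKeyLe a b := by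
  simp [pvLexGt, pvKeyLe]; omega

theorem pvLexLt_false_iff (a b : Int × Int) : pvLexLt a b = false ↔ pvKeyLe b a := by
  simp [pvLexLt, pvKeyLe]; omega

theorem pvKeyLe_refl (a : Int × Int) : pvKeyLe a a := by simp [pvKeyLe]

theorem pvKeyLe_trans {a b c : Int × Int} (h1 : pvKeyLe a b) (h2 : pvKeyLe b c) : pvKeyLe a c := by
  simp [pvKeyLe] at *; omega

theorem pvKeyLe_total (a b : Int × Int) : pvKeyLe a b ∨ pvKeyLe b a := by
  simp [pvKeyLe]; omega

theorem pvKeyLe_antisymm {a b : Int × Int} (h1 : pvKeyLe a b) (h2 : pvKeyLe b a) : a = b := by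
  simp [pvKeyLe] at *
  obtain ⟨x, y⟩ := a; obtain ⟨u, v⟩ := b
  simp_all; omega

-- B's max-fold: the result is a member dominating (in pvKeyLe) the start and every scanned index
theorem pvFoldMax_spec (key : Int → Int × Int) (xs : List Int) (b : Int) :
    ∃ r, xs.foldl (fun best i =>
        match best with
        | none => some i
        | some b => if pvLexGt (key i) (key b) then some i else some b) (some b) = some r ∧
      (r = b ∨ r ∈ xs) ∧ pvKeyLe (key b) (key r) ∧ ∀ x ∈ xs, pvKeyLe (key x) (key r) := by
  induction xs generalizing b with
  | nil => exact ⟨b, rfl, Or.inl rfl, pvKeyLe_refl _, by simp⟩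
  | cons x xs ih =>
    simp only [List.foldl_cons]
    by_cases h : pvLexGt (key x) (key b) = true
    · rw [if_pos h]
      obtain ⟨r, hr, hmem, hle, hall⟩ := ih x
      refine ⟨r, hr, ?_, ?_, ?_⟩
      · rcases hmem with h' | h' <;> simp [h']
      · rcases pvKeyLe_total (key b) (key x) with h' | h'
        · exact pvKeyLe_trans h' hle
        · rw [← pvLexGt_false_iff] at h'; simp [h] at h'
      · intro y hy
        rcases List.mem_cons.mp hy with h' | h'
        · subst h'; exact hle
        · exact hall y h'
    · rw [if_neg h]
      obtain ⟨r, hr, hmem, hle, hall⟩ := ih b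
      refine ⟨r, hr, ?_, hle, ?_⟩
      · rcases hmem with h' | h' <;> simp [h']
      · intro y hy
        rcases List.mem_cons.mp hy with h' | h'
        · subst h'
          have := (pvLexGt_false_iff (key y) (key b)).mp (by simpa using h)
          exact pvKeyLe_trans this hle
        · exact hall y h'

-- B's min-fold: the result is a member dominated-from-below: it is ≤ start and ≤ every scanned index
theorem pvFoldMin_spec (key : Int → Int × Int) (xs : List Int) (b : Int) :
    ∃ r, xs.foldl (fun best i =>
        match best with
        | none => some i
        | some b => if pvLexLt (key i) (key b) then some i else some b) (some b) = some r ∧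
      (r = b ∨ r ∈ xs) ∧ pvKeyLe (key r) (key b) ∧ ∀ x ∈ xs, pvKeyLe (key r) (key x) := by
  induction xs generalizing b with
  | nil => exact ⟨b, rfl, Or.inl rfl, pvKeyLe_refl _, by simp⟩
  | cons x xs ih =>
    simp only [List.foldl_cons]
    by_cases h : pvLexLt (key x) (key b) = true
    · rw [if_pos h]
      obtain ⟨r, hr, hmem, hle, hall⟩ := ih x
      refine ⟨r, hr, ?_, ?_, ?_⟩
      · rcases hmem with h' | h' <;> simp [h']
      · rcases pvKeyLe_total (key x) (key b) with h' | h'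
        · exact pvKeyLe_trans hle h'
        · rw [← pvLexLt_false_iff] at h'; simp [h] at h'
      · intro y hy
        rcases List.mem_cons.mp hy with h' | h'
        · subst h'; exact hle
        · exact hall y h'
    · rw [if_neg h]
      obtain ⟨r, hr, hmem, hle, hall⟩ := ih b
      refine ⟨r, hr, ?_, hle, ?_⟩
      · rcases hmem with h' | h' <;> simp [h']
      · intro y hy
        rcases List.mem_cons.mp hy with h' | h'
        · subst h'
          have := (pvLexLt_false_iff (key y) (key b)).mp (by simpa using h)
          exact pvKeyLe_trans hle this
        · exact hall y h'

-- enumerate membership characterisation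
theorem pvMemEnum {α : Type} (l : List α) (s i : Int) (v : α) :
    (i, v) ∈ PySem.List.enumerate l s ↔ ∃ k : Nat, i = s + k ∧ l[k]? = some v := by
  induction l generalizing s with
  | nil => simp [PySem.List.enumerate_nil]
  | cons x xs ih =>
    rw [PySem.List.enumerate_cons]
    simp only [List.mem_cons, Prod.mk.injEq, ih]
    constructor
    · rintro (⟨h1, h2⟩ | ⟨k, hk, hv⟩)
      · exact ⟨0, by omega, by simp [h2]⟩
      · exact ⟨k + 1, by omega, by simpa using hv⟩
    · rintro ⟨k, hk, hv⟩
      cases k with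
      | zero => left; simp at hv; exact ⟨by omega, hv.symm⟩
      | succ k => right; exact ⟨k, by omega, by simpa using hv⟩

-- enumerate indices strictly increase
theorem pvEnumPairwise {α : Type} (l : List α) (s : Int) :
    (PySem.List.enumerate l s).Pairwise (fun a b => a.1 < b.1) := by
  induction l generalizing s with
  | nil => simp [PySem.List.enumerate_nil]
  | cons x xs ih =>
    rw [PySem.List.enumerate_cons]
    refine List.Pairwise.cons ?_ (ih (s + 1))
    rintro ⟨j, v⟩ hj
    obtain ⟨k, hk, -⟩ := (pvMemEnum xs (s + 1) j v).mp hj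
    simp; omega

-- in a strictly increasing list, getLast is the maximum
theorem pvGetLast_max (xs : List Int) (h : xs ≠ []) (hp : xs.Pairwise (· < ·)) :
    ∀ x ∈ xs, x ≤ xs.getLast h := by
  induction xs with
  | nil => simp at h
  | cons a t ih =>
    intro x hx
    cases t with
    | nil => simp at hx; simp [hx]
    | cons b u =>
      rw [List.getLast_cons (by simp)]
      rcases List.mem_cons.mp hx with h' | h'
      · subst h'
        have : x < b := (List.pairwise_cons.mp hp).1 b (by simp)
        have hb : b ≤ (b :: u).getLast (by simp) :=
          ih (by simp) (List.pairwise_cons.mp hp).2 b (by simp)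
        omega
      · exact ih (by simp) (List.pairwise_cons.mp hp).2 x h'
  
-- the list _sub_func builds: indices of value, in increasing order
theorem pvTemp_eq (l : List Int) (value : Int) :
    (PySem.List.enumerate l).foldl
      (fun acc iv => if iv.2 == value then acc ++ [iv.1] else acc) []
    = ((PySem.List.enumerate l).filter (fun iv => iv.2 == value)).map Prod.fst := by
  simpa using PySem.List.foldl_append_if (fun iv : Int × Int => iv.2 == value) Prod.fst
    (PySem.List.enumerate l) []

theorem pvMemTemp (l : List Int) (value i : Int) :
    i ∈ ((PySem.List.enumerate l).filter (fun iv => iv.2 == value)).map Prod.fst ↔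
      ∃ k : Nat, i = (k : Int) ∧ l[k]? = some value := by
  constructor
  · intro h
    obtain ⟨⟨j, v⟩, hmem, rfl⟩ := List.mem_map.mp h
    have := List.mem_filter.mp hmem
    obtain ⟨k, hk, hv⟩ := (pvMemEnum l 0 j v).mp this.1
    have : v = value := by simpa using this.2
    exact ⟨k, by omega, by rw [← this]; exact hv⟩
  · rintro ⟨k, rfl, hv⟩
    refine List.mem_map.mpr ⟨((k : Int), value), List.mem_filter.mpr ⟨?_, by simp⟩, rfl⟩
    exact (pvMemEnum l 0 k value).mpr ⟨k, by omega, hv⟩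

theorem pvTempPairwise (l : List Int) (value : Int) :
    (((PySem.List.enumerate l).filter (fun iv => iv.2 == value)).map Prod.fst).Pairwise (· < ·) := by
  refine List.Pairwise.map Prod.fst (fun a b h => h) ?_
  exact List.Pairwise.filter _ (pvEnumPairwise l 0)

-- characterisation of A's _sub_func when value occurs in l:
-- it returns the LARGEST index j with l[j] = value
theorem pvSubFunc_spec (l : List Int) (value : Int) (hmem : value ∈ l) :
    ∃ j : Nat, pvSubFunc l value = (j : Int) ∧ l[j]? = some value ∧
      ∀ k : Nat, l[k]? = some value → (k : Int) ≤ (j : Int) := by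
  simp only [pvSubFunc, pvTemp_eq]
  set temp := ((PySem.List.enumerate l).filter (fun iv => iv.2 == value)).map Prod.fst with htemp
  have hne : temp ≠ [] := by
    obtain ⟨k, hk⟩ := List.mem_iff_getElem?.mp hmem
    exact List.ne_nil_of_mem ((pvMemTemp l value k).mpr ⟨k, rfl, hk⟩)
  have hgl : PySem.List.pyGetD temp (-1) 0 = temp.getLast hne := PySem.List.pyGetD_neg_one temp 0 hne
  rw [hgl]
  obtain ⟨j, hj, hv⟩ := (pvMemTemp l value _).mp (List.getLast_mem hne)
  refine ⟨j, hj, hv, ?_⟩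
  intro k hk
  have hkle := pvGetLast_max temp hne (pvTempPairwise l value) _
    ((pvMemTemp l value k).mpr ⟨k, rfl, hk⟩)
  rw [hj] at hkle
  exact hkle

-- bridge: pyGetD at a Nat-cast index equals getElem
theorem pvPyGetD_eq (l : List Int) (k : Nat) (hk : k < l.length) :
    PySem.List.pyGetD l (k : Int) 0 = l[k] := by
  rw [PySem.List.pyGetD_natCast]
  simp [List.getD_eq_getElem?_getD, List.getElem?_eq_getElem hk]

-- A and B agree, higher_better = true
theorem pvMainTrue (l : List Int) (hpre : l ≠ []) :
    find_best_value_index_py l true = find_best_value_index_py_alt l true := by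
  -- A side
  obtain ⟨m, hm⟩ : ∃ m, PySem.List.max? l (fun y => y) = some m := by
    cases l with
    | nil => exact absurd rfl hpre
    | cons x t => exact ⟨t.foldl max x, PySem.List.max?_id_cons x t⟩
  have hm_mem := PySem.List.max?_mem hm
  have hm_max := PySem.List.max?_isMax hm
  obtain ⟨j, hAj, hjv, hjmax⟩ := pvSubFunc_spec l m hm_mem
  obtain ⟨hjlen, hjval⟩ := List.getElem?_eq_some_iff.mp hjv
  have hKj1 : PySem.List.pyGetD l (j : Int) 0 = m := by rw [pvPyGetD_eq l j hjlen, hjval]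
  -- B side
  have hlen : (0 : Int) < (l.length : Int) := by
    have := List.length_pos_iff.mpr hpre; exact_mod_cast this
  obtain ⟨r, hr, hrmem, hrle0, hrall⟩ :=
    pvFoldMax_spec (fun i => (PySem.List.pyGetD l i 0, i)) (PySem.List.pyRange 1 l.length 1) 0
  -- common dominance facts
  have hdomA : ∀ i : Int, 0 ≤ i → i < (l.length : Int) →
      pvKeyLe (PySem.List.pyGetD l i 0, i) (PySem.List.pyGetD l (j : Int) 0, (j : Int)) := by
    intro i h0 hn
    have hilen : i.toNat < l.length := by omega
    have hi : PySem.List.pyGetD l i 0 = l[i.toNat] :=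
      PySem.List.pyGetD_eq_getElem l 0 h0 (by exact_mod_cast hn)
    have hle_m : l[i.toNat] ≤ m := hm_max _ (List.getElem_mem hilen)
    rcases lt_or_eq_of_le hle_m with hlt | heq
    · left; rw [hi, hKj1]; exact hlt
    · right
      have : (i.toNat : Int) ≤ (j : Int) :=
        hjmax i.toNat (by rw [List.getElem?_eq_getElem hilen, heq])
      exact ⟨by rw [hi, hKj1, heq], by omega⟩
  have hdomB : ∀ i : Int, 0 ≤ i → i < (l.length : Int) →
      pvKeyLe (PySem.List.pyGetD l i 0, i) (PySem.List.pyGetD l r 0, r) := by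
    intro i h0 hn
    rcases eq_or_lt_of_le h0 with h1 | h1
    · subst h1; exact hrle0
    · exact hrall i (PySem.List.mem_pyRange_one.mpr ⟨by omega, by omega⟩)
  have hr_range : 0 ≤ r ∧ r < (l.length : Int) := by
    rcases hrmem with h | h
    · omega
    · have := PySem.List.mem_pyRange_one.mp h; omega
  have hrj : pvKeyLe (PySem.List.pyGetD l r 0, r) (PySem.List.pyGetD l (j : Int) 0, (j : Int)) :=
    hdomA r hr_range.1 hr_range.2
  have hjr : pvKeyLe (PySem.List.pyGetD l (j : Int) 0, (j : Int)) (PySem.List.pyGetD l r 0, r) :=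
    hdomB j (by omega) (by exact_mod_cast hjlen)
  have hkey := pvKeyLe_antisymm hrj hjr
  have hrjeq : r = (j : Int) := congrArg Prod.snd hkey
  -- assemble
  simp only [find_best_value_index_py, find_best_value_index_py_alt, if_pos, hm]
  rw [hAj, PySem.List.pyRange_one_cons hlen]
  simp only [List.foldl_cons, zero_add]
  rw [hr]
  simp [hrjeq]

-- A and B agree, higher_better = false
theorem pvMainFalse (l : List Int) (hpre : l ≠ []) :
    find_best_value_index_py l false = find_best_value_index_py_alt l false := by
  obtain ⟨m, hm⟩ : ∃ m, PySem.List.min? l (fun y => y) = some m := by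
    cases l with
    | nil => exact absurd rfl hpre
    | cons x t => exact ⟨t.foldl min x, PySem.List.min?_id_cons x t⟩
  have hm_mem := PySem.List.min?_mem hm
  have hm_min := PySem.List.min?_isMin hm
  obtain ⟨j, hAj, hjv, hjmax⟩ := pvSubFunc_spec l m hm_mem
  obtain ⟨hjlen, hjval⟩ := List.getElem?_eq_some_iff.mp hjv
  have hKj1 : PySem.List.pyGetD l (j : Int) 0 = m := by rw [pvPyGetD_eq l j hjlen, hjval]
  have hlen : (0 : Int) < (l.length : Int) := by
    have := List.length_pos_iff.mpr hpre; exact_mod_cast this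
  obtain ⟨r, hr, hrmem, hrle0, hrall⟩ :=
    pvFoldMin_spec (fun i => (PySem.List.pyGetD l i 0, -i)) (PySem.List.pyRange 1 l.length 1) 0
  have hdomA : ∀ i : Int, 0 ≤ i → i < (l.length : Int) →
      pvKeyLe (PySem.List.pyGetD l (j : Int) 0, -(j : Int)) (PySem.List.pyGetD l i 0, -i) := by
    intro i h0 hn
    have hilen : i.toNat < l.length := by omega
    have hi : PySem.List.pyGetD l i 0 = l[i.toNat] :=
      PySem.List.pyGetD_eq_getElem l 0 h0 (by exact_mod_cast hn)
    have hle_m : m ≤ l[i.toNat] := hm_min _ (List.getElem_mem hilen)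
    rcases lt_or_eq_of_le hle_m with hlt | heq
    · left; rw [hi, hKj1]; exact hlt
    · right
      have : (i.toNat : Int) ≤ (j : Int) :=
        hjmax i.toNat (by rw [List.getElem?_eq_getElem hilen, ← heq])
      exact ⟨by rw [hi, hKj1, heq], by omega⟩
  have hdomB : ∀ i : Int, 0 ≤ i → i < (l.length : Int) →
      pvKeyLe (PySem.List.pyGetD l r 0, -r) (PySem.List.pyGetD l i 0, -i) := by
    intro i h0 hn
    rcases eq_or_lt_of_le h0 with h1 | h1
    · subst h1; simpa using hrle0
    · exact hrall i (PySem.List.mem_pyRange_one.mpr ⟨by omega, by omega⟩)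
  have hr_range : 0 ≤ r ∧ r < (l.length : Int) := by
    rcases hrmem with h | h
    · omega
    · have := PySem.List.mem_pyRange_one.mp h; omega
  have hrj : pvKeyLe (PySem.List.pyGetD l (j : Int) 0, -(j : Int)) (PySem.List.pyGetD l r 0, -r) :=
    hdomA r hr_range.1 hr_range.2
  have hjr : pvKeyLe (PySem.List.pyGetD l r 0, -r) (PySem.List.pyGetD l (j : Int) 0, -(j : Int)) :=
    hdomB j (by omega) (by exact_mod_cast hjlen)
  have hkey := pvKeyLe_antisymm hjr hrj
  have hrjeq : r = (j : Int) := by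
    have := congrArg Prod.snd hkey; simp at this; omega
  simp only [find_best_value_index_py, find_best_value_index_py_alt, hm]
  rw [hAj, PySem.List.pyRange_one_cons hlen]
  simp only [List.foldl_cons, zero_add]
  rw [hr]
  simp [hrjeq]

-- ===== VERDICT (by name: the statement is the Claim_ definition above) =====
theorem find_best_value_index_py_spec : Claim_equal_find_best_value_index_py := by
  intro value_list higher_better _ hpre
  unfold Spec_find_best_value_index_py
  cases higher_better with
  | true => exact (pvMainTrue value_list hpre).symm ▸ rfl
  | false => exact (pvMainFalse value_list hpre).symm ▸ rfl
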